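-- pv_equiv track=rewrite | github.com/IDeA-ANL-ORNL/StructBioReasoner | struct_bio_reasoner/agents/computational_design/rosetta_agent.py | _identify_loop_regions
-- ===== SOURCE A (Python) =====
-- from typing import Dict, List, Optional, Any, Tuple
--
-- def _identify_loop_regions(problem_regions: List[int]) -> List[Tuple[int, int]]:
--     """Identify loop regions from problem regions."""
--     if not problem_regions:
--         # Return some default loop regions for demonstration
--         return [(20, 25), (45, 52), (78, 84)]
--
--     # Group consecutive residues into loop regions
--     loop_regions = []
--     if problem_regions:
--         start = problem_regions[0]
--         end = start
--
--         for i in range(1, len(problem_regions)):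
--             if problem_regions[i] == end + 1:
--                 end = problem_regions[i]
--             else:
--                 if end - start >= 3:  # Minimum loop length
--                     loop_regions.append((start, end))
--                 start = problem_regions[i]
--                 end = start
--
--         # Add the last region
--         if end - start >= 3:
--             loop_regions.append((start, end))
--
--     return loop_regions
-- ===== SOURCE B (Python) =====
-- def _identify_loop_regions(problem_regions):
--     """Identify loop regions from problem regions."""
--     if not problem_regions:
--         return [(20, 25), (45, 52), (78, 84)]
--     n = len(problem_regions)
--     # Stage 1: run-start indices, found by pairwise comparison with the predecessor.
--     starts = [i for i in range(n)
--               if i == 0 or problem_regions[i] != problem_regions[i - 1] + 1]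
--     # Stage 2: each run spans [start, next start); zip starts with the shifted copy.
--     ends = starts[1:] + [n]
--     return [(problem_regions[s], problem_regions[e - 1])
--             for s, e in zip(starts, ends)
--             if problem_regions[e - 1] - problem_regions[s] >= 3]
-- ===== Notes on version B (the rewrite author's own statement) =====
-- stated objective: alternative
-- what changed: B replaces A's inline start/end scalar tracking with index arithmetic: it first computes the list of run-start indices by comparing each element with its predecessor, then zips it with its own shifted copy to get (start,end) index pairs and filters/maps them in a comprehension.
import Mathlib
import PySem

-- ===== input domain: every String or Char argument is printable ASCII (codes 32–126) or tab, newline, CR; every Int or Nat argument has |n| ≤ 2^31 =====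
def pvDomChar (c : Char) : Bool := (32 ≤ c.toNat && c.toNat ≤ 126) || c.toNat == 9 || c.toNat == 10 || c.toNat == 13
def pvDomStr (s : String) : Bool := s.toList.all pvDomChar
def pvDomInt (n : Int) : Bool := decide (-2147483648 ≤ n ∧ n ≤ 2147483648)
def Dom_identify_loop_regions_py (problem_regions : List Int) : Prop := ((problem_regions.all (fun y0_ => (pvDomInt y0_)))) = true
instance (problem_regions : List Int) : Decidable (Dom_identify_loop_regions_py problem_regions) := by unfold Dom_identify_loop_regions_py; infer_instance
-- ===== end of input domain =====

-- B finds run-start indices by pairwise comparison with the predecessor, zips them with a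
-- shifted copy to get index ranges and filters in a comprehension, instead of A's inline
-- start/end scalar tracking (alternative decomposition, same cost).


-- ===== PORT A =====
-- A's for-loop over i in range(1, len): state (loop_regions, start, end); the values
-- problem_regions[i] for i = 1 … len-1 are exactly the elements of the tail.
def pvALoop (xs : List Int) (acc : List (Int × Int)) (s e : Int) :
    List (Int × Int) × Int × Int :=
  match xs with
  | [] => (acc, s, e)
  | v :: rest =>
    if v = e + 1 then pvALoop rest acc s v
    else pvALoop rest (if e - s ≥ 3 then acc ++ [(s, e)] else acc) v v

def identify_loop_regions_py (problem_regions : List Int) : List (Int × Int) :=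
  match problem_regions with
  | [] => [(20, 25), (45, 52), (78, 84)]
  | h :: t =>
    let r := pvALoop t [] h h
    if r.2.2 - r.2.1 ≥ 3 then r.1 ++ [(r.2.1, r.2.2)] else r.1

-- ===== PORT B =====
-- Source B stage 1 as a named helper: the run-start indices
-- [i for i in range(n) if i == 0 or xs[i] != xs[i-1] + 1].
-- Every index used in port B is in range (starts ⊆ range n; ends entries are between 1
-- and n), so Python's xs[i] is exact as getD with a default that is never read.

def pvStarts (xs : List Int) : List Nat :=
  (List.range xs.length).filter
    (fun i => i == 0 || !(xs.getD i 0 == xs.getD (i - 1) 0 + 1))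


def identify_loop_regions_py_alt (problem_regions : List Int) : List (Int × Int) :=
  match problem_regions with
  | [] => [(20, 25), (45, 52), (78, 84)]
  | _ :: _ =>
    let starts := pvStarts problem_regions
    let ends := starts.drop 1 ++ [problem_regions.length]
    (starts.zip ends).filterMap (fun p =>
      if problem_regions.getD (p.2 - 1) 0 - problem_regions.getD p.1 0 ≥ 3 then
        some (problem_regions.getD p.1 0, problem_regions.getD (p.2 - 1) 0)
      else none)

-- ===== PRECONDITION & SPEC =====
def Spec_identify_loop_regions_py (problem_regions : List Int) (out : List (Int × Int)) : Prop := out = identify_loop_regions_py_alt problem_regions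
instance (problem_regions : List Int) (out : List (Int × Int)) : Decidable (Spec_identify_loop_regions_py problem_regions out) := by unfold Spec_identify_loop_regions_py; infer_instance

-- ===== CLAIM (what is proved, stated in full; the proofs are below) =====
def Claim_equal_identify_loop_regions_py : Prop := ∀ (problem_regions : List Int), Dom_identify_loop_regions_py problem_regions → Spec_identify_loop_regions_py problem_regions (identify_loop_regions_py problem_regions)

-- ===== LEMMAS AND PROOFS =====

-- Canonical recursive form of the run grouping (proof intermediate between A and B).
def pvCanon (xs : List Int) (s e : Int) : List (Int × Int) :=
  match xs with
  | [] => if e - s ≥ 3 then [(s, e)] else []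
  | v :: rest =>
    if v = e + 1 then pvCanon rest s v
    else (if e - s ≥ 3 then [(s, e)] else []) ++ pvCanon rest v v


-- pvF: B's per-pair function, generalized so the start value at index 0 is a parameter
-- (inside a run, the run-start value s is an element that lies before the current list).
def pvF (xs : List Int) (s : Int) (p : Nat × Nat) : Option (Int × Int) :=
  let sv := if p.1 = 0 then s else xs.getD p.1 0
  let ev := xs.getD (p.2 - 1) 0
  if ev - sv ≥ 3 then some (sv, ev) else none

def pvEmit (xs : List Int) (s : Int) : List (Int × Int) :=
  let st := pvStarts xs
  (st.zip (st.drop 1 ++ [xs.length])).filterMap (pvF xs s)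


theorem pvStarts_core (e : Int) (t : List Int) :
    pvStarts (e :: t) =
      0 :: ((List.range t.length).filter
        (fun i => !(t.getD i 0 == (e :: t).getD i 0 + 1))).map (· + 1) := by
  unfold pvStarts
  rw [List.length_cons, List.range_succ_eq_map, List.filter_cons]
  simp only [beq_self_eq_true, Bool.true_or, if_pos]
  rw [List.filter_map]
  simp only [Function.comp_def, Nat.succ_eq_add_one]
  congr 1

theorem pvStarts_single (e : Int) : pvStarts [e] = [0] := by
  simp [pvStarts_core]

theorem pvStarts_cont (e v : Int) (r : List Int) (h : v = e + 1) :
    pvStarts (e :: v :: r) = 0 :: ((pvStarts (v :: r)).drop 1).map (· + 1) := by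
  rw [pvStarts_core, pvStarts_core v r]
  simp only [List.drop_one, List.tail_cons, List.length_cons, List.range_succ_eq_map,
    List.filter_cons, List.filter_map]
  simp [h, Function.comp_def]

theorem pvStarts_break (e v : Int) (r : List Int) (h : ¬ v = e + 1) :
    pvStarts (e :: v :: r) = 0 :: (pvStarts (v :: r)).map (· + 1) := by
  rw [pvStarts_core, pvStarts_core v r]
  simp only [List.length_cons, List.range_succ_eq_map, List.filter_cons, List.filter_map]
  simp [h, Function.comp_def]


theorem pvShift (e s s' : Int) (t : List Int) (l r : List Nat)
    (h0 : ∀ a ∈ l, a = 0 → s' = t.getD 0 0)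
    (hr : ∀ b ∈ r, 1 ≤ b) :
    ((l.map (· + 1)).zip (r.map (· + 1))).filterMap (pvF (e :: t) s) =
    (l.zip r).filterMap (pvF t s') := by
  induction l generalizing r with
  | nil => simp
  | cons a l ih =>
    cases r with
    | nil => simp
    | cons b r =>
      simp only [List.map_cons, List.zip_cons_cons, List.filterMap_cons]
      have hb : 1 ≤ b := hr b (List.mem_cons_self ..)
      have hev : (e :: t).getD (b + 1 - 1) 0 = t.getD (b - 1) 0 := by
        have h1 : b + 1 - 1 = (b - 1) + 1 := by omega
        rw [h1, List.getD_cons_succ]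
      have hsv : (if a + 1 = 0 then s else (e :: t).getD (a + 1) 0) =
          (if a = 0 then s' else t.getD a 0) := by
        by_cases ha : a = 0
        · subst ha
          simp [h0 0 (List.mem_cons_self ..) rfl]
        · simp [ha, List.getD]
      rw [ih r (fun x hx hx0 => h0 x (List.mem_cons_of_mem _ hx) hx0)
        (fun x hx => hr x (List.mem_cons_of_mem _ hx))]
      simp only [pvF, hev, hsv]


-- A's loop plus its final emit equals the canonical recursion.
theorem pvA_canon (xs : List Int) : ∀ (acc : List (Int × Int)) (s e : Int),
    (let r := pvALoop xs acc s e;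
     if r.2.2 - r.2.1 ≥ 3 then r.1 ++ [(r.2.1, r.2.2)] else r.1) =
    acc ++ pvCanon xs s e := by
  induction xs with
  | nil => intro acc s e; simp only [pvALoop, pvCanon]; split_ifs <;> simp
  | cons v rest ih =>
    intro acc s e
    simp only [pvALoop, pvCanon]
    by_cases hv : v = e + 1
    · simp only [if_pos hv]; exact ih acc s v
    · simp only [if_neg hv]
      rw [ih _ v v]
      split_ifs <;> simp

-- The canonical recursion equals the index computation on e :: t with start value s.
theorem pvCanon_emit (t : List Int) : ∀ (s e : Int), pvCanon t s e = pvEmit (e :: t) s := by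
  induction t with
  | nil =>
    intro s e
    simp only [pvCanon, pvEmit, pvStarts_single, pvF, List.length_cons, List.length_nil,
      List.drop_one, List.tail_cons, List.nil_append, List.zip_cons_cons, List.zip_nil_right,
      List.filterMap_cons, List.filterMap_nil]
    norm_num
    split_ifs <;> rfl
  | cons v rest ih =>
    intro s e
    have hS := pvStarts_core v rest
    set l₁ := ((List.range rest.length).filter
      (fun i => !(rest.getD i 0 == (v :: rest).getD i 0 + 1))).map (· + 1) with hl₁def
    have hl₁pos : ∀ a ∈ l₁, 1 ≤ a := by
      intro a ha; rw [hl₁def] at ha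
      simp only [List.mem_map] at ha
      obtain ⟨x, _, rfl⟩ := ha; omega
    have hrpos : ∀ b ∈ l₁ ++ [rest.length + 1], 1 ≤ b := by
      intro b hb
      rcases List.mem_append.1 hb with hm | hm
      · exact hl₁pos b hm
      · simp only [List.mem_singleton] at hm; omega
    by_cases hv : v = e + 1
    · rw [(show pvCanon (v :: rest) s e = pvCanon rest s v by simp [pvCanon, hv]), ih s v]
      unfold pvEmit
      rw [pvStarts_cont e v rest hv, hS]
      simp only [List.drop_one, List.tail_cons, List.length_cons]
      rw [show l₁.map (· + 1) ++ [rest.length + 1 + 1] =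
        (l₁ ++ [rest.length + 1]).map (· + 1) by simp]
      rcases hm : l₁ ++ [rest.length + 1] with _ | ⟨c, cs⟩
      · simp at hm
      · have hc1 : 1 ≤ c := hrpos c (by rw [hm]; exact List.mem_cons_self ..)
        have hcs : ∀ b ∈ cs, 1 ≤ b := fun b hb => hrpos b (by rw [hm]; exact List.mem_cons_of_mem _ hb)
        simp only [List.map_cons, List.zip_cons_cons, List.filterMap_cons]
        have hhead : pvF (e :: v :: rest) s (0, c + 1) = pvF (v :: rest) s (0, c) := by
          have h1 : c + 1 - 1 = (c - 1) + 1 := by omega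
          simp only [pvF, h1, List.getD_cons_succ]
          simp
        rw [hhead, pvShift e s s (v :: rest) l₁ cs
          (fun a ha h0 => absurd h0 (by have := hl₁pos a ha; omega)) hcs]
    · rw [(show pvCanon (v :: rest) s e =
        (if e - s ≥ 3 then [(s, e)] else []) ++ pvCanon rest v v by
          simp only [pvCanon]; rw [if_neg hv]), ih v v]
      conv_rhs => rw [pvEmit]
      rw [pvStarts_break e v rest hv, hS]
      simp only [List.drop_one, List.tail_cons, List.length_cons, List.map_cons]
      rw [List.cons_append]
      simp only [List.zip_cons_cons, List.filterMap_cons]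
      rw [(show List.map (fun x => x + 1) l₁ ++ [rest.length + 1 + 1] =
        List.map (fun x => x + 1) (l₁ ++ [rest.length + 1]) by simp)]
      rw [(show (0 + 1) :: List.map (fun x => x + 1) l₁ =
        List.map (fun x => x + 1) (0 :: l₁) by simp)]
      rw [pvShift e s v (v :: rest) (0 :: l₁) (l₁ ++ [rest.length + 1])
        (fun a _ _ => rfl) hrpos]
      have hE : pvEmit (v :: rest) v =
          List.filterMap (pvF (v :: rest) v) ((0 :: l₁).zip (l₁ ++ [rest.length + 1])) := by
        rw [pvEmit, hS]; simp
      have hh : pvF (e :: v :: rest) s (0, 0 + 1) =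
          if e - s ≥ 3 then some (s, e) else none := by
        simp [pvF]
      rw [hh, ← hE]
      split_ifs <;> simp

-- Port B on a nonempty list is the pvEmit computation with start value the head
-- (B's comprehension body is pvF with the index-0 start value instantiated to the head).
theorem pvB_emit (h : Int) (t : List Int) :
    identify_loop_regions_py_alt (h :: t) = pvEmit (h :: t) h := by
  show ((pvStarts (h :: t)).zip ((pvStarts (h :: t)).drop 1 ++ [(h :: t).length])).filterMap
      (fun p =>
        if (h :: t).getD (p.2 - 1) 0 - (h :: t).getD p.1 0 ≥ 3 then
          some ((h :: t).getD p.1 0, (h :: t).getD (p.2 - 1) 0)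
        else none) = pvEmit (h :: t) h
  rw [pvEmit]
  apply List.filterMap_congr
  intro p _
  rcases p with ⟨a, b⟩
  cases a with
  | zero => simp [pvF]
  | succ n => simp [pvF]

-- ===== VERDICT (by name: the statement is the Claim_ definition above) =====
theorem identify_loop_regions_py_spec : Claim_equal_identify_loop_regions_py := by
  intro xs _
  unfold Spec_identify_loop_regions_py
  cases xs with
  | nil => rfl
  | cons h t =>
    have hA : identify_loop_regions_py (h :: t) = pvCanon t h h :=
      pvA_canon t [] h h
    rw [hA, pvCanon_emit t h h, pvB_emit h t]
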